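-- pv_equiv track=rewrite | github.com/szapf70/codecomp | codewars/python/solved/_separateLiquids.py | separate_liquids
-- ===== SOURCE A (Python) =====
-- import itertools
--
-- def separate_liquids(glass):
--     pre = list(itertools.chain(*glass))
--     prec = len(glass[0])
--     t = []
--     for l in ['O','A','W','H']:
--         t.extend([l] * pre.count(l))
--     res = []
--     while t:
--         res.append(t[:prec])
--         t = t[prec:]
--     return res
-- ===== SOURCE B (Python) =====
-- def separate_liquids(glass):
--     order = {'O': 0, 'A': 1, 'W': 2, 'H': 3}
--     t = sorted((c for row in glass for c in row if c in order), key=order.__getitem__)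
--     prec = len(glass[0])
--     res = []
--     while t:
--         res.append(t[:prec])
--         t = t[prec:]
--     return res
-- ===== Notes on version B (the rewrite author's own statement) =====
-- stated objective: idiomatic
-- what changed: Replaces the four-pass count-and-replicate counting sort with a single flatten-filter pass and a stable comparison sort keyed by a density-rank dict; the chunking while-loop is kept.
import Mathlib
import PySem

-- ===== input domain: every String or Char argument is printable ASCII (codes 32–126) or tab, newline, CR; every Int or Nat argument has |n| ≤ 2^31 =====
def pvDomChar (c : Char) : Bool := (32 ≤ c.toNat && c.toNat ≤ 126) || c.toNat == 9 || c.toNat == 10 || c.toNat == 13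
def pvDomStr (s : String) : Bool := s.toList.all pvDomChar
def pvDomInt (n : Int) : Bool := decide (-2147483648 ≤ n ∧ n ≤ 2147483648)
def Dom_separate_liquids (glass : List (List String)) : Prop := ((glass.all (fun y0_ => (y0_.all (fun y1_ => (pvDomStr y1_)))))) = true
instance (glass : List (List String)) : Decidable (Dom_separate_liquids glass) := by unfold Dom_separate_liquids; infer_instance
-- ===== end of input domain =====

-- B replaces A's four-pass count-and-replicate counting sort by one flatten-filter
-- pass plus a stable comparison sort keyed by a density-rank dict (idiomatic).

-- ===== PORT A =====
-- the 'while t: res.append(t[:prec]); t = t[prec:]' loop of A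
-- (prec = 0 with t nonempty diverges in Python; excluded by Pre_, here returns [])
def pvChunkA (prec : Nat) : List String → List (List String)
  | [] => []
  | x :: xs =>
      if _h : prec = 0 then []
      else (x :: xs).take prec :: pvChunkA prec ((x :: xs).drop prec)
  termination_by t => t.length
  decreasing_by simp; omega

def separate_liquids (glass : List (List String)) : List (List String) :=
  match PySem.List.pyGet? glass 0 with
  | none => []   -- Python raises IndexError on glass == []; excluded by Pre_
  | some row0 =>
      let pre := glass.flatten
      let prec := row0.length
      let t := (["O", "A", "W", "H"] : List String).foldl
        (fun t l => t ++ List.replicate (PySem.List.count pre l) l) []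
      pvChunkA prec t

-- ===== PORT B =====
def pvOrder : PySem.Dict String Int :=
  (((PySem.Dict.empty.insert "O" 0).insert "A" 1).insert "W" 2).insert "H" 3

-- the same 'while t:' chunking loop, as written in B
def pvChunkB (prec : Nat) : List String → List (List String)
  | [] => []
  | x :: xs =>
      if _h : prec = 0 then []
      else (x :: xs).take prec :: pvChunkB prec ((x :: xs).drop prec)
  termination_by t => t.length
  decreasing_by simp; omega

def separate_liquids_alt (glass : List (List String)) : List (List String) :=
  let t := PySem.List.sorted
    (glass.flatten.filter (fun c => (pvOrder.get? c).isSome))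
    (fun c => pvOrder.getD c 0)
  match PySem.List.pyGet? glass 0 with
  | none => []   -- Python raises IndexError on glass == []
  | some row0 => pvChunkB row0.length t

-- ===== PRECONDITION & SPEC =====
-- Pre_ excludes exactly the inputs where Python A does not return: glass == []
-- (IndexError on glass[0]) and the case len(glass[0]) == 0 while some liquid
-- letter is present (t never shrinks, the while loop diverges).
def Pre_separate_liquids (glass : List (List String)) : Prop :=
  glass ≠ [] ∧
    ((glass.headD []).length ≠ 0 ∨
      glass.flatten.all (fun c => !(c ∈ (["O", "A", "W", "H"] : List String))) = true)
instance (glass : List (List String)) : Decidable (Pre_separate_liquids glass) := by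
  unfold Pre_separate_liquids; infer_instance

def pvWitness_separate_liquids : List (List String) := [["A", "O"], ["W", "H"]]

def Spec_separate_liquids (glass : List (List String)) (out : List (List String)) : Prop := out = separate_liquids_alt glass
instance (glass : List (List String)) (out : List (List String)) : Decidable (Spec_separate_liquids glass out) := by unfold Spec_separate_liquids; infer_instance

-- ===== CLAIM (what is proved, stated in full; the proofs are below) =====
def Claim_equal_separate_liquids : Prop := ∀ (glass : List (List String)), Dom_separate_liquids glass → Pre_separate_liquids glass → Spec_separate_liquids glass (separate_liquids glass)

-- ===== LEMMAS AND PROOFS =====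

-- the two chunking helpers have identical definitions
theorem pvChunk_eq (prec : Nat) (t : List String) : pvChunkA prec t = pvChunkB prec t := by
  induction t using pvChunkA.induct prec with
  | case1 => simp [pvChunkA, pvChunkB]
  | case2 x xs h =>
      rw [pvChunkA, pvChunkB]; simp [h]
  | case3 x xs h ih =>
      rw [pvChunkA, pvChunkB]
      simp only [dif_neg h, ih]

def pvKey (c : String) : Int := pvOrder.getD c 0
def pvBefore (a b : String) : Bool := decide (pvKey a < pvKey b)

-- the canonical counting-sort output of A
def pvCan (a b c d : Nat) : List String :=
  List.replicate a "O" ++ List.replicate b "A" ++ List.replicate c "W" ++ List.replicate d "H"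

-- insertBy skips a block of elements that do not come strictly after x
theorem pvInsert_skip (x y : String) (h : pvBefore x y = false) (n : Nat) (rest : List String) :
    PySem.List.insertBy pvBefore x (List.replicate n y ++ rest)
      = List.replicate n y ++ PySem.List.insertBy pvBefore x rest := by
  induction n with
  | zero => simp
  | succ n ih => simp [List.replicate_succ, PySem.List.insertBy, h, ih]

-- insertBy puts x in front of a block of strictly-later elements
theorem pvInsert_front (x : String) (rest : List String)
    (h : ∀ y ∈ rest, pvBefore x y = true) :
    PySem.List.insertBy pvBefore x rest = x :: rest := by
  cases rest with
  | nil => simp [PySem.List.insertBy]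
  | cons y ys => simp [PySem.List.insertBy, h y (by simp)]

theorem pvInsert_canO (a b c d : Nat) :
    PySem.List.insertBy pvBefore "O" (pvCan a b c d) = pvCan (a + 1) b c d := by
  unfold pvCan
  simp only [List.append_assoc]
  rw [pvInsert_skip "O" "O" (by decide),
    pvInsert_front "O" (List.replicate b "A" ++ (List.replicate c "W" ++ List.replicate d "H"))
      (by intro y hy
          simp only [List.mem_append, List.mem_replicate] at hy
          rcases hy with ⟨_, rfl⟩ | ⟨_, rfl⟩ | ⟨_, rfl⟩ <;> decide)]
  simp [List.replicate_succ']

theorem pvInsert_canA (a b c d : Nat) :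
    PySem.List.insertBy pvBefore "A" (pvCan a b c d) = pvCan a (b + 1) c d := by
  unfold pvCan
  simp only [List.append_assoc]
  rw [pvInsert_skip "A" "O" (by decide), pvInsert_skip "A" "A" (by decide),
    pvInsert_front "A" (List.replicate c "W" ++ List.replicate d "H")
      (by intro y hy
          simp only [List.mem_append, List.mem_replicate] at hy
          rcases hy with ⟨_, rfl⟩ | ⟨_, rfl⟩ <;> decide)]
  simp [List.replicate_succ']

theorem pvInsert_canW (a b c d : Nat) :
    PySem.List.insertBy pvBefore "W" (pvCan a b c d) = pvCan a b (c + 1) d := by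
  unfold pvCan
  simp only [List.append_assoc]
  rw [pvInsert_skip "W" "O" (by decide), pvInsert_skip "W" "A" (by decide),
    pvInsert_skip "W" "W" (by decide),
    pvInsert_front "W" (List.replicate d "H")
      (by intro y hy
          simp only [List.mem_replicate] at hy
          rcases hy with ⟨_, rfl⟩; decide)]
  simp [List.replicate_succ']

theorem pvInsert_canH (a b c d : Nat) :
    PySem.List.insertBy pvBefore "H" (pvCan a b c d) = pvCan a b c (d + 1) := by
  unfold pvCan
  simp only [List.append_assoc]
  rw [pvInsert_skip "H" "O" (by decide), pvInsert_skip "H" "A" (by decide),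
    pvInsert_skip "H" "W" (by decide),
    PySem.List.insertBy_of_forall_not_before pvBefore "H" (List.replicate d "H")
      (by intro y hy
          simp only [List.mem_replicate] at hy
          rcases hy with ⟨_, rfl⟩; decide)]
  simp [List.replicate_succ']

theorem pvFoldl_can (l : List String) :
    (∀ x ∈ l, x ∈ (["O", "A", "W", "H"] : List String)) → ∀ (a b c d : Nat),
    l.foldl (fun acc x => PySem.List.insertBy pvBefore x acc) (pvCan a b c d)
      = pvCan (a + l.count "O") (b + l.count "A") (c + l.count "W") (d + l.count "H") := by
  induction l with
  | nil => intro _ a b c d; simp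
  | cons x xs ih =>
      intro hl a b c d
      have hx := hl x (by simp)
      have ih' := ih (fun y hy => hl y (List.mem_cons_of_mem _ hy))
      fin_cases hx <;>
        simp only [List.foldl_cons, pvInsert_canO, pvInsert_canA, pvInsert_canW,
          pvInsert_canH, ih', List.count_cons] <;>
        simp <;> ring_nf

theorem pvSorted_filter (l : List String) :
    PySem.List.sorted (l.filter (fun c => ((pvOrder.get? c).isSome : Bool))) pvKey
      = pvCan (l.count "O") (l.count "A") (l.count "W") (l.count "H") := by
  rw [PySem.List.sorted_eq_foldl_insertBy]
  have hmem : ∀ x ∈ l.filter (fun c => ((pvOrder.get? c).isSome : Bool)),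
      x ∈ (["O", "A", "W", "H"] : List String) := by
    intro x hx
    have h := List.of_mem_filter hx
    simp only [pvOrder, PySem.Dict.get?_insert, PySem.Dict.get?_empty] at h
    split_ifs at h with h1 h2 h3 h4 <;> simp_all
  have hmain := pvFoldl_can _ hmem 0 0 0 0
  simp only [Nat.zero_add] at hmain
  have h0 : (pvCan 0 0 0 0 : List String) = [] := by simp [pvCan]
  rw [show (fun a b => decide (pvKey a < pvKey b)) = pvBefore from rfl, ← h0, hmain,
    List.count_filter (a := "O") (by decide), List.count_filter (a := "A") (by decide),
    List.count_filter (a := "W") (by decide), List.count_filter (a := "H") (by decide)]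

-- ===== VERDICT (by name: the statement is the Claim_ definition above) =====
theorem separate_liquids_spec : Claim_equal_separate_liquids := by
  intro glass _ _
  unfold Spec_separate_liquids separate_liquids separate_liquids_alt
  cases glass with
  | nil => simp [PySem.List.pyGet?]
  | cons g gs =>
      have hget : PySem.List.pyGet? (g :: gs) 0 = some g := by
        simp [PySem.List.pyGet?, PySem.List.pyIdx?]
      simp only [hget]
      have hkey : (fun c => pvOrder.getD c 0) = pvKey := rfl
      rw [hkey, pvSorted_filter, ← pvChunk_eq]
      congr 1
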